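-- pv_equiv track=rewrite | github.com/peguo0/cowFace | outputImages/splitPurpleImage.py | sumGreens
-- ===== SOURCE A (Python) =====
-- def sumGreens(greenValues):
--     greenLessThan10 = 0
--     greenMoreThan245 = 0
--     for greenValue in greenValues:
--         if greenValue < 10:
--             greenLessThan10 = greenLessThan10 + 1
--         elif greenValue > 245:
--             greenMoreThan245 = greenMoreThan245 + 1
--         else:
--             continue
--     return greenLessThan10, greenMoreThan245
-- ===== SOURCE B (Python) =====
-- def sumGreens(greenValues):
--     greenValues = list(greenValues)
--     lt = sum(1 for g in greenValues if g < 10)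
--     gt = sum(1 for g in greenValues if g > 245)
--     return lt, gt
-- ===== Notes on version B (the rewrite author's own statement) =====
-- stated objective: simpler
-- what changed: Replaces the single fused accumulator loop with two independent filtering passes (sum of a generator per condition); the branches are mutually exclusive so the counts agree.
import Mathlib
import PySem

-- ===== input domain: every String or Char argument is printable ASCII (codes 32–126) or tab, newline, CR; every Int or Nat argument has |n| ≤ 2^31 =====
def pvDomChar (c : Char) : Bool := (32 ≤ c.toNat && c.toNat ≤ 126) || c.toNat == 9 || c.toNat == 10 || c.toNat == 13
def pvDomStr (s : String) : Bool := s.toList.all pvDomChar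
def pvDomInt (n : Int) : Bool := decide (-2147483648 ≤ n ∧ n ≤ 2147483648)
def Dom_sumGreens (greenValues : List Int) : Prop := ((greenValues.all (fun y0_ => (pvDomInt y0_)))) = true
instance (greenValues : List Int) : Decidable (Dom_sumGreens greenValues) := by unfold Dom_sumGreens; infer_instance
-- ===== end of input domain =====

-- B replaces A's single fused accumulator loop by two independent filtering passes (simpler decomposition, same cost).

-- ===== PORT A =====
def sumGreens (greenValues : List Int) : Int × Int :=
  let s := greenValues.foldl
    (fun (acc : Int × Int) greenValue =>
      if greenValue < 10 then (acc.1 + 1, acc.2)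
      else if greenValue > 245 then (acc.1, acc.2 + 1)
      else acc)
    (0, 0)
  (s.1, s.2)

-- ===== PORT B =====
def sumGreens_alt (greenValues : List Int) : Int × Int :=
  ((((greenValues.filter (fun g => g < 10)).map (fun _ => (1 : Int))).sum),
   (((greenValues.filter (fun g => g > 245)).map (fun _ => (1 : Int))).sum))

-- ===== PRECONDITION & SPEC =====
def Spec_sumGreens (greenValues : List Int) (out : Int × Int) : Prop := out = sumGreens_alt greenValues
instance (greenValues : List Int) (out : Int × Int) : Decidable (Spec_sumGreens greenValues out) := by unfold Spec_sumGreens; infer_instance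

-- ===== CLAIM (what is proved, stated in full; the proofs are below) =====
def Claim_equal_sumGreens : Prop := ∀ (greenValues : List Int), Dom_sumGreens greenValues → Spec_sumGreens greenValues (sumGreens greenValues)

-- ===== LEMMAS AND PROOFS =====
theorem sumGreens_fold_shift (greenValues : List Int) (a b : Int) :
    greenValues.foldl
      (fun (acc : Int × Int) greenValue =>
        if greenValue < 10 then (acc.1 + 1, acc.2)
        else if greenValue > 245 then (acc.1, acc.2 + 1)
        else acc)
      (a, b)
    = (a + (((greenValues.filter (fun g => g < 10)).map (fun _ => (1 : Int))).sum),
       b + (((greenValues.filter (fun g => g > 245)).map (fun _ => (1 : Int))).sum)) := by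
  induction greenValues generalizing a b with
  | nil => simp
  | cons x xs ih =>
    simp only [List.foldl_cons, List.filter_cons]
    by_cases h1 : x < 10
    · have h2 : ¬ (245 < x) := by omega
      simp [h1, h2, ih]; ring
    · by_cases h2 : x > 245
      · simp [h1, h2, ih]; ring
      · simp [h1, h2, ih]

-- ===== VERDICT (by name: the statement is the Claim_ definition above) =====
theorem sumGreens_spec : Claim_equal_sumGreens := by
  intro gv _
  unfold Spec_sumGreens sumGreens sumGreens_alt
  simp [sumGreens_fold_shift]
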